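-- pv_equiv track=rewrite | github.com/bruadam/hvx | core/domain/models/building_analysis.py | aggregate_spaces_worst_case
-- ===== SOURCE A (Python) =====
-- def aggregate_spaces_worst_case(
--
--     room_categories: dict[str, str]
-- ) -> str:
--     """
--     Aggregate multiple rooms using worst-space method.
--
--     Strict compliance: building category = worst room category.
--
--     Args:
--         room_categories: Dict mapping room_id -> category ("I", "II", "III", "IV")
--
--     Returns:
--         Overall building category (worst among all rooms)
--     """
--     if not room_categories:
--         return "IV"
--
--     category_to_numeric = {"I": 1, "II": 2, "III": 3, "IV": 4}
--     numeric_to_category = {1: "I", 2: "II", 3: "III", 4: "IV"}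
--
--     worst_numeric = max(
--         category_to_numeric.get(cat, 4)
--         for cat in room_categories.values()
--     )
--
--     return numeric_to_category[worst_numeric]
-- ===== SOURCE B (Python) =====
-- def aggregate_spaces_worst_case(
--
--     room_categories: dict[str, str]
-- ) -> str:
--     """Worst-room aggregation by priority-ordered membership tests (no numeric maps)."""
--     if not room_categories:
--         return "IV"
--     vals = room_categories.values()
--     if any(v not in ("I", "II", "III") for v in vals):
--         return "IV"
--     if "III" in vals:
--         return "III"
--     if "II" in vals:
--         return "II"
--     return "I"
-- ===== Notes on version B (the rewrite author's own statement) =====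
-- stated objective: simpler
-- what changed: Replaced the two numeric translation dicts and the max over mapped scores by direct priority-ordered membership tests on the category values (unknown/IV first, then III, II, I).
import Mathlib
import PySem

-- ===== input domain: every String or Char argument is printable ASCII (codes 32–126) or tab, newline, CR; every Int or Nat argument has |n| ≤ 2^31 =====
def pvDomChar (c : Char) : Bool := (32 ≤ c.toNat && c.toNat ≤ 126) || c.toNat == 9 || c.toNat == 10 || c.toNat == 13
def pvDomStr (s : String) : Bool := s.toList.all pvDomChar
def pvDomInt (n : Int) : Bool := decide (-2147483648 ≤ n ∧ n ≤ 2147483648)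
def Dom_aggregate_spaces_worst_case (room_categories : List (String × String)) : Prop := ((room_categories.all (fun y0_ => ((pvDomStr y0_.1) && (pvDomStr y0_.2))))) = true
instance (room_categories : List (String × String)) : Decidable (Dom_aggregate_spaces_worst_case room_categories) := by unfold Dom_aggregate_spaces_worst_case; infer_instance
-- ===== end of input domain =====

-- B replaces the numeric score dicts + max by priority-ordered membership tests; objective: simpler.
-- ===== PORT A =====
def pvCatToNum : PySem.Dict String Int := PySem.Dict.ofList [("I", 1), ("II", 2), ("III", 3), ("IV", 4)]
def pvNumToCat : PySem.Dict Int String := PySem.Dict.ofList [((1 : Int), "I"), (2, "II"), (3, "III"), (4, "IV")]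
def aggregate_spaces_worst_case (room_categories : List (String × String)) : String :=
  if room_categories = [] then "IV"
  else
    let d := PySem.Dict.ofList room_categories
    -- max(...) over a nonempty generator; .getD 4 is unreachable since d.values ≠ [] here
    let worst_numeric := (PySem.List.max? (d.values.map (fun cat => pvCatToNum.getD cat 4)) (fun x => x)).getD 4
    -- numeric_to_category[worst_numeric]: worst_numeric ∈ {1,2,3,4}, so the KeyError branch (.getD "IV") is unreachable
    (pvNumToCat.get? worst_numeric).getD "IV"


-- ===== PORT B =====
def aggregate_spaces_worst_case_alt (room_categories : List (String × String)) : String :=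
  if room_categories = [] then "IV"
  else
    let vals := (PySem.Dict.ofList room_categories).values
    if vals.any (fun v => !(v == "I" || v == "II" || v == "III")) then "IV"
    else if vals.contains "III" then "III"
    else if vals.contains "II" then "II"
    else "I"


-- ===== PRECONDITION & SPEC =====
def Spec_aggregate_spaces_worst_case (room_categories : List (String × String)) (out : String) : Prop := out = aggregate_spaces_worst_case_alt room_categories
instance (room_categories : List (String × String)) (out : String) : Decidable (Spec_aggregate_spaces_worst_case room_categories out) := by unfold Spec_aggregate_spaces_worst_case; infer_instance

-- ===== CLAIM (what is proved, stated in full; the proofs are below) =====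
def Claim_equal_aggregate_spaces_worst_case : Prop := ∀ (room_categories : List (String × String)), Dom_aggregate_spaces_worst_case room_categories → Spec_aggregate_spaces_worst_case room_categories (aggregate_spaces_worst_case room_categories)


-- ===== LEMMAS AND PROOFS =====
def pvScore (cat : String) : Int :=
  if cat = "IV" then 4 else if cat = "III" then 3 else if cat = "II" then 2 else if cat = "I" then 1 else 4

lemma pvCatToNum_getD (cat : String) : pvCatToNum.getD cat 4 = pvScore cat := by
  simp only [pvCatToNum, PySem.Dict.ofList, PySem.Dict.update, List.foldl, pvScore,
    PySem.Dict.getD_insert, PySem.Dict.getD_empty]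

lemma pvScore_le_four (cat : String) : pvScore cat ≤ 4 := by
  unfold pvScore; split_ifs <;> omega

lemma pvValues_ne_nil (room_categories : List (String × String)) (h : room_categories ≠ []) :
    (PySem.Dict.ofList room_categories).values ≠ [] := by
  have hk : (PySem.Dict.ofList room_categories).keys
      = PySem.Set.update (PySem.Dict.empty : PySem.Dict String String).keys (room_categories.map (fun p => p.1)) :=
    PySem.Dict.keys_foldl_insert_key room_categories (fun p => p.1) (fun _ p => p.2) PySem.Dict.empty
  have hk2 : (PySem.Dict.ofList room_categories).keys ≠ [] := by
    obtain ⟨p, rest, rfl⟩ := List.exists_cons_of_ne_nil h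
    rw [hk]
    intro hnil
    have : p.1 ∈ PySem.Set.update (PySem.Dict.empty : PySem.Dict String String).keys ((p :: rest).map (fun p => p.1)) := by
      rw [PySem.Dict.keys_empty, PySem.Set.update_nil_left, PySem.Set.mem_ofList]
      simp
    rw [hnil] at this
    exact absurd this (List.not_mem_nil)
  intro hv
  apply hk2
  have : (PySem.Dict.ofList room_categories).items = [] := by
    have := congrArg List.length hv
    simpa [PySem.Dict.values] using this
  simp [PySem.Dict.keys, this]

lemma pvCore (vals : List String) (h : vals ≠ []) :
    (pvNumToCat.get? ((PySem.List.max? (vals.map (fun cat => pvCatToNum.getD cat 4)) (fun x => x)).getD 4)).getD "IV"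
      = (if vals.any (fun v => !(v == "I" || v == "II" || v == "III")) then "IV"
         else if vals.contains "III" then "III"
         else if vals.contains "II" then "II" else "I") := by
  have hmap : vals.map (fun cat => pvCatToNum.getD cat 4) = vals.map pvScore := by
    simp [pvCatToNum_getD]
  rw [hmap]
  have hne : vals.map pvScore ≠ [] := by simpa using h
  obtain ⟨m, hm⟩ : ∃ m, PySem.List.max? (vals.map pvScore) (fun x => x) = some m := by
    cases hmm : PySem.List.max? (vals.map pvScore) (fun x => x) with
    | none => exact absurd ((PySem.List.max?_eq_none_iff _ _).mp hmm) hne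
    | some m => exact ⟨m, rfl⟩
  have hmem := PySem.List.max?_mem hm
  have hmax := PySem.List.max?_isMax hm
  rw [hm]
  simp only [Option.getD_some]
  obtain ⟨w, hw, hwm⟩ := List.mem_map.mp hmem
  split_ifs with h1 h2 h3
  · -- some value outside {I,II,III}: the max score is 4
    rw [List.any_eq_true] at h1
    obtain ⟨v, hv, hvc⟩ := h1
    simp only [Bool.not_eq_eq_eq_not, Bool.not_true, Bool.or_eq_false_iff, beq_eq_false_iff_ne] at hvc
    have hv4 : pvScore v = 4 := by unfold pvScore; split_ifs <;> simp_all
    have h4m : (4 : Int) ≤ m := hv4 ▸ hmax _ (List.mem_map_of_mem hv)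
    have hm4 : m = 4 := le_antisymm (hwm ▸ pvScore_le_four w) h4m
    rw [hm4]; decide
  · -- all values in {I,II,III} and "III" present: the max score is 3
    have hall : ∀ v ∈ vals, pvScore v ≤ 3 := by
      intro v hv
      have : ¬ ((fun v => !(v == "I" || v == "II" || v == "III")) v = true) := by
        intro hc
        exact h1 (List.any_eq_true.mpr ⟨v, hv, hc⟩)
      simp only [Bool.not_eq_eq_eq_not, Bool.not_true, Bool.not_eq_false, Bool.or_eq_true_iff,
        beq_iff_eq] at this
      unfold pvScore; rcases this with ((rfl | rfl) | rfl) <;> simp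
    have h3mem : "III" ∈ vals := by simpa using h2
    have h3m : (3 : Int) ≤ m := by
      have := hmax _ (List.mem_map_of_mem h3mem)
      simpa [pvScore] using this
    have hm3 : m = 3 := le_antisymm (hwm ▸ hall w hw) h3m
    rw [hm3]; decide
  · -- all values in {I,II}: "II" present: the max score is 2
    have hall : ∀ v ∈ vals, pvScore v ≤ 2 := by
      intro v hv
      have hk : ¬ ((fun v => !(v == "I" || v == "II" || v == "III")) v = true) := by
        intro hc
        exact h1 (List.any_eq_true.mpr ⟨v, hv, hc⟩)
      have hni : v ≠ "III" := by
        intro rfl_eq; subst rfl_eq; exact h2 (by simp at *; exact hv)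
      simp only [Bool.not_eq_eq_eq_not, Bool.not_true, Bool.not_eq_false, Bool.or_eq_true_iff,
        beq_iff_eq] at hk
      unfold pvScore; rcases hk with ((rfl | rfl) | rfl) <;> simp_all
    have h2mem : "II" ∈ vals := by simpa using h3
    have h2m : (2 : Int) ≤ m := by
      have := hmax _ (List.mem_map_of_mem h2mem)
      simpa [pvScore] using this
    have hm2 : m = 2 := le_antisymm (hwm ▸ hall w hw) h2m
    rw [hm2]; decide
  · -- every value is "I": the max score is 1
    have hall : ∀ v ∈ vals, pvScore v = 1 := by
      intro v hv
      have hk : ¬ ((fun v => !(v == "I" || v == "II" || v == "III")) v = true) := by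
        intro hc
        exact h1 (List.any_eq_true.mpr ⟨v, hv, hc⟩)
      have hn3 : v ≠ "III" := fun he => h2 (by subst he; simpa using hv)
      have hn2 : v ≠ "II" := fun he => h3 (by subst he; simpa using hv)
      simp only [Bool.not_eq_eq_eq_not, Bool.not_true, Bool.not_eq_false, Bool.or_eq_true_iff,
        beq_iff_eq] at hk
      unfold pvScore; rcases hk with ((rfl | rfl) | rfl) <;> simp_all
    have hm1 : m = 1 := by rw [← hwm, hall w hw]
    rw [hm1]; decide

-- ===== VERDICT (by name: the statement is the Claim_ definition above) =====
theorem aggregate_spaces_worst_case_spec : Claim_equal_aggregate_spaces_worst_case := by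
  intro rc _
  unfold Spec_aggregate_spaces_worst_case aggregate_spaces_worst_case aggregate_spaces_worst_case_alt
  by_cases h : rc = []
  · simp [h]
  · simp only [h, if_false]
    exact pvCore _ (pvValues_ne_nil rc h)
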